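-- pv_equiv track=rewrite | github.com/hillaryychan/iccsh | src/compression.py | generate_comma_code
-- ===== SOURCE A (Python) =====
-- def generate_comma_code(length):
--     code = []
--     for i in range(length+1):
--         if i == 0:
--             code.append('0')
--         elif i == length:
--             code.append('1'*i)
--         else:
--             code.append('1'*i+'0')
--     return code
-- ===== SOURCE B (Python) =====
-- def generate_comma_code(length):
--     if length == 0:
--         return ['0']
--     code = []
--     ones = ''
--     for _ in range(length):
--         code.append(ones + '0')
--         ones += '1'
--     code.append(ones)
--     return code
-- ===== Notes on version B (the rewrite author's own statement) =====
-- stated objective: alternative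
-- what changed: B threads an accumulator string of ones that grows one '1' per step instead of recomputing '1'*i in every iteration, appending the all-ones codeword after the loop (with the trivial base case returned directly).
-- outside the precondition, e.g. on generate_comma_code(-1): A returns [], B returns ['']
import Mathlib
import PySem

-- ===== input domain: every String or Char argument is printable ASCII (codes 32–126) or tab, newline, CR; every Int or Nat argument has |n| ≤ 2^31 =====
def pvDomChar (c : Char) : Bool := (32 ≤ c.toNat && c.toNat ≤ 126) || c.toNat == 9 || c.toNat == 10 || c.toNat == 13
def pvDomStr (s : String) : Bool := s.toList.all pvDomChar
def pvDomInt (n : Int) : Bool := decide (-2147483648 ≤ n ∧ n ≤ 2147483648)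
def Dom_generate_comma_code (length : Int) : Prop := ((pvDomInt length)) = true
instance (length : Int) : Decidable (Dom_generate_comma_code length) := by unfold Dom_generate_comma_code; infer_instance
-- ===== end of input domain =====

-- B builds the codewords by growing an accumulator string of ones one '1' per step
-- instead of recomputing '1'*i each iteration (alternative decomposition, same cost).

-- ===== PORT A =====
def generate_comma_code (length : Int) : List String :=
  (PySem.List.pyRange 0 (length + 1) 1).foldl
    (fun code i =>
      if i = 0 then code ++ ["0"]
      else if i = length then code ++ [String.ofList (PySem.List.pyRepeat ['1'] i)]
      else code ++ [String.ofList (PySem.List.pyRepeat ['1'] i ++ ['0'])])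
    []

-- ===== PORT B =====
def generate_comma_code_alt (length : Int) : List String :=
  if length = 0 then ["0"]
  else
    let p := (PySem.List.pyRange 0 length 1).foldl
      (fun (s : List String × List Char) _ =>
        (s.1 ++ [String.ofList (s.2 ++ ['0'])], s.2 ++ ['1']))
      ([], [])
    p.1 ++ [String.ofList p.2]

-- ===== PRECONDITION & SPEC =====
-- Pre_ restricts to the natural domain of a code length: nonnegative lengths
-- (on negative lengths A's empty loop returns [] while B returns ['']).
def Pre_generate_comma_code (length : Int) : Prop := 0 ≤ length
instance (length : Int) : Decidable (Pre_generate_comma_code length) := by unfold Pre_generate_comma_code; infer_instance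
def pvWitness_generate_comma_code : Int := (3)

def Spec_generate_comma_code (length : Int) (out : List String) : Prop := out = generate_comma_code_alt length
instance (length : Int) (out : List String) : Decidable (Spec_generate_comma_code length out) := by unfold Spec_generate_comma_code; infer_instance

-- ===== CLAIM (what is proved, stated in full; the proofs are below) =====
def Claim_equal_generate_comma_code : Prop := ∀ (length : Int), Dom_generate_comma_code length → Pre_generate_comma_code length → Spec_generate_comma_code length (generate_comma_code length)

-- ===== LEMMAS AND PROOFS =====

-- the common closed form for n ≥ 1: one '1'^k ++ "0" per k < n, then the all-ones word
def pvCC (n : Nat) : List String :=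
  (List.range n).map (fun k => String.ofList (List.replicate k '1' ++ ['0'])) ++
    [String.ofList (List.replicate n '1')]

lemma pvFoldA (n m : Nat) (h1 : 1 ≤ m) (hm : m ≤ n) :
    (PySem.List.pyRange 0 (m : Int) 1).foldl
      (fun code i =>
        if i = 0 then code ++ ["0"]
        else if i = (n : Int) then code ++ [String.ofList (PySem.List.pyRepeat ['1'] i)]
        else code ++ [String.ofList (PySem.List.pyRepeat ['1'] i ++ ['0'])])
      [] =
    (List.range m).map (fun k => String.ofList (List.replicate k '1' ++ ['0'])) := by
  induction m with
  | zero => omega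
  | succ m ih =>
    have hsplit : PySem.List.pyRange 0 ((m : Int) + 1) 1
        = PySem.List.pyRange 0 (m : Int) 1 ++ [(m : Int)] := by
      exact PySem.List.pyRange_one_succ_right (by positivity)
    rcases Nat.eq_or_lt_of_le h1 with h | h
    · -- m + 1 = 1, i.e. m = 0
      have hm0 : m = 0 := by omega
      subst hm0
      simp only [Nat.cast_zero, zero_add] at hsplit ⊢
      simp [hsplit, List.range_succ]
    · have hm1 : 1 ≤ m := by omega
      push_cast
      rw [hsplit, List.foldl_append, ih hm1 (by omega)]
      have hne0 : (m : Int) ≠ 0 := by exact_mod_cast (by omega : m ≠ 0)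
      have hnen : (m : Int) ≠ (n : Int) := by exact_mod_cast (by omega : m ≠ n)
      have hm0 : m ≠ 0 := by omega
      have hmn : m ≠ n := by omega
      simp [hnen, hm0, PySem.List.pyRepeat_singleton, List.range_succ]

lemma pvFoldB (m : Nat) :
    (PySem.List.pyRange 0 (m : Int) 1).foldl
      (fun (s : List String × List Char) _ =>
        (s.1 ++ [String.ofList (s.2 ++ ['0'])], s.2 ++ ['1']))
      ([], []) =
    ((List.range m).map (fun k => String.ofList (List.replicate k '1' ++ ['0'])),
      List.replicate m '1') := by
  induction m with
  | zero => simp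
  | succ m ih =>
    have hsplit : PySem.List.pyRange 0 ((m : Int) + 1) 1
        = PySem.List.pyRange 0 (m : Int) 1 ++ [(m : Int)] := by
      exact PySem.List.pyRange_one_succ_right (by positivity)
    push_cast
    rw [hsplit, List.foldl_append, ih]
    simp [List.range_succ, List.replicate_succ']

lemma pvA_eq (n : Nat) (h : 1 ≤ n) : generate_comma_code (n : Int) = pvCC n := by
  unfold generate_comma_code pvCC
  have hsplit : PySem.List.pyRange 0 ((n : Int) + 1) 1
      = PySem.List.pyRange 0 (n : Int) 1 ++ [(n : Int)] := by
    exact PySem.List.pyRange_one_succ_right (by positivity)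
  rw [hsplit, List.foldl_append, pvFoldA n n h le_rfl]
  have hne0 : (n : Int) ≠ 0 := by exact_mod_cast (by omega : n ≠ 0)
  have hn0 : n ≠ 0 := by omega
  simp [hn0, PySem.List.pyRepeat_singleton]

lemma pvB_eq (n : Nat) (h : 1 ≤ n) : generate_comma_code_alt (n : Int) = pvCC n := by
  unfold generate_comma_code_alt pvCC
  have hne0 : (n : Int) ≠ 0 := by exact_mod_cast (by omega : n ≠ 0)
  simp only [hne0, if_false, pvFoldB n]

-- ===== VERDICT (by name: the statement is the Claim_ definition above) =====
theorem generate_comma_code_spec : Claim_equal_generate_comma_code := by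
  intro length _ hpre
  unfold Spec_generate_comma_code
  obtain ⟨n, rfl⟩ : ∃ n : Nat, length = (n : Int) :=
    ⟨length.toNat, (Int.toNat_of_nonneg hpre).symm⟩
  rcases Nat.eq_zero_or_pos n with h0 | h1
  · subst h0; decide
  · rw [pvA_eq n h1, pvB_eq n h1]
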